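-- pv_equiv track=rewrite | github.com/LatencyTDH/coding-competitions | oracle.py | best_bus_sizes
-- ===== SOURCE A (Python) =====
-- def best_bus_sizes(friends):
--     n = len(friends)
--     cumulative = [0] * n
--     for i, friend_size in enumerate(friends):
--         cumulative[i] = cumulative[i-1] + friend_size
--
--     valid_sizes = set(cumulative)
--     possible_sizes = []
--     total_people = cumulative[-1]
--
--     for candidate in cumulative:
--         running_partition_size = candidate
--         while running_partition_size <= total_people:
--             if running_partition_size not in valid_sizes:
--                 break
--             if running_partition_size == total_people:
--                 possible_sizes.append(candidate)
--                 break
--             running_partition_size += candidate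
--
--     return possible_sizes
-- ===== SOURCE B (Python) =====
-- def best_bus_sizes(friends):
--     prefix = []
--     s = 0
--     for f in friends:
--         s += f
--         prefix.append(s)
--     total = prefix[-1]
--     valid = set(prefix)
--     good = set()
--     for k in range(1, len(friends) + 1):
--         if total % k == 0:
--             size = total // k
--             if all(j * size in valid for j in range(1, k + 1)):
--                 good.add(size)
--     return [c for c in prefix if c in good]
-- ===== Notes on version B (the rewrite author's own statement) =====
-- stated objective: alternative
-- what changed: Instead of walking the multiples of every prefix-sum occurrence (duplicates re-walked, no divisibility pruning), B enumerates candidate bus COUNTS k=1..n, keeps only those dividing the total, checks each equal-partition chain once against the prefix-sum set, and filters the prefix list against the resulting set of good sizes.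
-- intended difference: On inputs whose total is negative and where some proper bus count k>=2 divides the total with its whole chain of multiples among the prefix sums, A returns only the occurrences of the total itself (its loop guard running<=total never starts the walk for a candidate above a negative total), while B also returns those smaller sizes, which is the intended value since they do partition the friends evenly. — e.g. on best_bus_sizes([-2, -2]): A returns [-4], B returns [-2, -4]
import Mathlib
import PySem

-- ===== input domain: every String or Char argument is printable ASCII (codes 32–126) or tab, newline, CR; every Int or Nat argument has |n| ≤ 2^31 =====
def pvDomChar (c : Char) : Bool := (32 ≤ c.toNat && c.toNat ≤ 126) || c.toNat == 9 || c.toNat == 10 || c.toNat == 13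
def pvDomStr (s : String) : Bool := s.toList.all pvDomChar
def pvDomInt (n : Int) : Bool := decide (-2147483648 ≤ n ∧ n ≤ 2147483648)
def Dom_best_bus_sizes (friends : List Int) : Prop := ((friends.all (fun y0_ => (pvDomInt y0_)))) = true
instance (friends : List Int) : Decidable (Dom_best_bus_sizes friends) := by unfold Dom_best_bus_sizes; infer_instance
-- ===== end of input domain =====

-- B replaces A's per-occurrence multiples walk by one enumeration of candidate bus counts
-- k = 1..n (kept only when k divides the total), each equal-partition chain checked once
-- against the prefix-sum set; the prefix list is then filtered against the good sizes.

-- ===== PORT A =====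
def pvWalkA (valid : PySem.Set Int) (total c : Int) : Nat → Int → Bool
  | 0, _ => false
  | fuel+1, running =>
    if running ≤ total then
      if ! PySem.Set.contains valid running then false
      else if running = total then true
      else pvWalkA valid total c fuel (running + c)
    else false

def best_bus_sizes (friends : List Int) : List Int :=
  let n := friends.length
  let cumulative := (PySem.List.enumerate friends 0).foldl
    (fun cum p => cum.set p.1.toNat (PySem.List.pyGetD cum (p.1 - 1) 0 + p.2))
    (List.replicate n (0:Int))
  let valid_sizes : PySem.Set Int := PySem.Set.ofList cumulative
  match PySem.List.pyGet? cumulative (-1) with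
  | none => []
  | some total_people =>
    cumulative.foldl
      (fun acc candidate =>
        if pvWalkA valid_sizes total_people candidate (n + 2) candidate
        then acc ++ [candidate] else acc) []

-- ===== PORT B =====
def best_bus_sizes_alt (friends : List Int) : List Int :=
  let st := friends.foldl (fun (st : List Int × Int) f => (st.1 ++ [st.2 + f], st.2 + f)) ([], 0)
  let prefx := st.1
  match PySem.List.pyGet? prefx (-1) with
  | none => []
  | some total =>
    let valid : PySem.Set Int := PySem.Set.ofList prefx
    let good : PySem.Set Int := (PySem.List.pyRange 1 ((friends.length : Int) + 1) 1).foldl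
      (fun g k =>
        if PySem.Int.mod total k = 0 then
          if (PySem.List.pyRange 1 (k + 1) 1).all
               (fun j => PySem.Set.contains valid (j * PySem.Int.floordiv total k))
          then PySem.Set.add g (PySem.Int.floordiv total k) else g
        else g) PySem.Set.empty
    prefx.filter (fun c => PySem.Set.contains good c)

-- ===== PRECONDITION & SPEC =====
def pvPrefixSums (s : Int) : List Int → List Int
  | [] => []
  | f :: fs => (s + f) :: pvPrefixSums (s + f) fs

-- Pre_ excludes the empty list (A raises IndexError on cumulative[-1]) and inputs whose prefix
-- sums contain 0 while the total is positive (A's while loop diverges on candidate 0 there);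
-- on every other input A returns normally.
def Pre_best_bus_sizes (friends : List Int) : Prop :=
  friends ≠ [] ∧ ¬((0:Int) ∈ pvPrefixSums 0 friends ∧ 0 < friends.sum)
instance (friends : List Int) : Decidable (Pre_best_bus_sizes friends) := by
  unfold Pre_best_bus_sizes; infer_instance

def pvWitness_best_bus_sizes : List Int := [1, 1, 2]

-- On inputs with a negative total where some proper bus count k ≥ 2 divides the total and the
-- whole chain of multiples of total/k lies among the prefix sums, A returns only the occurrences
-- of the total itself (its guard running <= total skips any candidate above a negative total)
-- while B also returns those smaller sizes, which do partition the friends evenly.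
def D_best_bus_sizes (friends : List Int) : Prop :=
  friends.sum < 0 ∧ ∃ k ∈ PySem.List.pyRange 2 ((friends.length : Int) + 1) 1,
    PySem.Int.mod friends.sum k = 0 ∧
    ∀ j ∈ PySem.List.pyRange 1 (k + 1) 1,
      j * PySem.Int.floordiv friends.sum k ∈ pvPrefixSums 0 friends
instance (friends : List Int) : Decidable (D_best_bus_sizes friends) := by
  unfold D_best_bus_sizes; infer_instance

def Spec_best_bus_sizes (friends : List Int) (out : List Int) : Prop := ¬ D_best_bus_sizes friends → out = best_bus_sizes_alt friends
instance (friends : List Int) (out : List Int) : Decidable (Spec_best_bus_sizes friends out) := by unfold Spec_best_bus_sizes; infer_instance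

def pvDiffWitness_best_bus_sizes : List Int := [-2, -2]
def pvDiffWitnessOut_best_bus_sizes : (List Int) × (List Int) := ([-4], [-2, -4])

-- ===== CLAIM (what is proved, stated in full; the proofs are below) =====
def Claim_unchanged_best_bus_sizes : Prop := ∀ (friends : List Int), Dom_best_bus_sizes friends → Pre_best_bus_sizes friends → Spec_best_bus_sizes friends (best_bus_sizes friends)
def Claim_changed_best_bus_sizes : Prop := Dom_best_bus_sizes (pvDiffWitness_best_bus_sizes) ∧ Pre_best_bus_sizes (pvDiffWitness_best_bus_sizes) ∧ D_best_bus_sizes (pvDiffWitness_best_bus_sizes) ∧ best_bus_sizes (pvDiffWitness_best_bus_sizes) = pvDiffWitnessOut_best_bus_sizes.1 ∧ best_bus_sizes_alt (pvDiffWitness_best_bus_sizes) = pvDiffWitnessOut_best_bus_sizes.2 ∧ pvDiffWitnessOut_best_bus_sizes.1 ≠ pvDiffWitnessOut_best_bus_sizes.2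
def Claim_exact_best_bus_sizes : Prop := ∀ (friends : List Int), Dom_best_bus_sizes friends → Pre_best_bus_sizes friends → D_best_bus_sizes friends → best_bus_sizes friends ≠ best_bus_sizes_alt friends

-- ===== LEMMAS AND PROOFS =====

lemma pvFoldB_eq : ∀ (fs : List Int) (pr : List Int) (s : Int),
    fs.foldl (fun (st : List Int × Int) f => (st.1 ++ [st.2 + f], st.2 + f)) (pr, s)
      = (pr ++ pvPrefixSums s fs, s + fs.sum) := by
  intro fs
  induction fs with
  | nil => intro pr s; simp [pvPrefixSums]
  | cons f fs ih =>
    intro pr s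
    simp only [List.foldl_cons, List.sum_cons, ih, pvPrefixSums]
    simp [List.append_assoc, add_assoc]

lemma pvPrefixSums_length (s : Int) (fs : List Int) : (pvPrefixSums s fs).length = fs.length := by
  induction fs generalizing s with
  | nil => rfl
  | cons f fs ih => simp [pvPrefixSums, ih]

lemma pvPrefixSums_getLast? (s : Int) (fs : List Int) (h : fs ≠ []) :
    (pvPrefixSums s fs).getLast? = some (s + fs.sum) := by
  induction fs generalizing s with
  | nil => simp at h
  | cons f fs ih =>
    cases fs with
    | nil => simp [pvPrefixSums]
    | cons g gs =>
      show ((s + f) :: pvPrefixSums (s + f) (g :: gs)).getLast? = _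
      have : pvPrefixSums (s + f) (g :: gs) = (s + f + g) :: pvPrefixSums (s + f + g) gs := rfl
      rw [this, List.getLast?_cons_cons, ← this, ih _ (by simp)]
      simp; ring

lemma pyGetD_rep_neg (n : Nat) (hn : 0 < n) :
    PySem.List.pyGetD (List.replicate n (0:Int)) (-1) 0 = 0 := by
  simp only [PySem.List.pyGetD, PySem.List.pyGet?, PySem.List.pyIdx?]
  norm_num [hn]
  rw [if_pos (by omega : 1 ≤ n)]
  simp [List.getElem?_replicate, Nat.sub_lt hn]

lemma pyGetD_append_last (done rest : List Int) (s : Int) (hd : done ≠ [])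
    (h : done.getLastD 0 = s) :
    PySem.List.pyGetD (done ++ rest) ((done.length : Int) - 1) 0 = s := by
  have hl : 0 < done.length := List.length_pos_iff.mpr hd
  simp only [PySem.List.pyGetD, PySem.List.pyGet?, PySem.List.pyIdx?]
  rw [if_pos (by omega : (0:Int) ≤ (done.length : Int) - 1)]
  rw [if_pos (by simp only [List.length_append]; push_cast; omega : (done.length : Int) - 1 < ((done ++ rest).length : Int))]
  rw [Option.bind_some]
  rw [List.getElem?_append_left (by omega)]
  rw [List.getElem?_eq_getElem (by omega)]
  simp only [Option.getD_some]
  rw [← h, List.getLastD_eq_getLast?, List.getLast?_eq_getElem?,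
     List.getElem?_eq_getElem (by omega)]
  simp only [Option.getD_some]
  congr 1
  omega

lemma pvFillA_eq : ∀ (fs done : List Int) (s : Int),
    done.getLastD 0 = s → (done = [] → fs ≠ []) →
    (PySem.List.enumerate fs (done.length : Int)).foldl
        (fun cum p => cum.set p.1.toNat (PySem.List.pyGetD cum (p.1 - 1) 0 + p.2))
        (done ++ List.replicate fs.length (0:Int))
      = done ++ pvPrefixSums s fs := by
  intro fs
  induction fs with
  | nil => intro done s _ _; simp [pvPrefixSums, PySem.List.enumerate]
  | cons f fs ih =>
    intro done s hs hne
    rw [PySem.List.enumerate_cons]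
    simp only [List.foldl_cons]
    have hget : PySem.List.pyGetD (done ++ List.replicate (f :: fs).length (0:Int))
        ((done.length : Int) - 1) 0 = s := by
      cases done with
      | nil =>
        have hs0 : s = 0 := by simpa using hs.symm
        subst hs0
        simpa using pyGetD_rep_neg (f :: fs).length (by simp)
      | cons d ds => exact pyGetD_append_last _ _ _ (by simp) hs
    have hset : (done ++ List.replicate (f :: fs).length (0:Int)).set
          ((done.length : Int)).toNat (s + f)
        = (done ++ [s + f]) ++ List.replicate fs.length (0:Int) := by
      simp only [List.length_cons, List.replicate_succ, Int.toNat_natCast]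
      rw [List.set_append_right _ _ (le_refl _)]
      simp
    rw [hget, hset]
    have hlen : ((done.length : Int) + 1) = (((done ++ [s + f]).length : Int)) := by
      simp
    rw [hlen, ih (done ++ [s + f]) (s + f) (by simp) (by simp)]
    simp [pvPrefixSums]

lemma pvFilter_lt (l : List Int) (p q : Int → Bool) (a : Int) (ha : a ∈ l)
    (hpq : ∀ v, p v = true → q v = true) (hpa : p a = false) (hqa : q a = true) :
    (l.filter p).length < (l.filter q).length := by
  induction l with
  | nil => simp at ha
  | cons x xs ih =>
    have hmono : (xs.filter p).length ≤ (xs.filter q).length := by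
      rw [← List.countP_eq_length_filter, ← List.countP_eq_length_filter]
      exact List.countP_mono_left (fun v _ h => hpq v h)
    rcases List.mem_cons.mp ha with rfl | hxs
    · simp only [List.filter_cons, hpa, hqa]
      simpa using Nat.lt_succ_of_le hmono
    · have h := ih hxs
      by_cases hx : p x = true
      · simp [List.filter_cons, hx, hpq x hx]; omega
      · simp only [List.filter_cons, Bool.not_eq_true] at *
        cases hqx : q x <;> simp [hx, hqx] <;> omega

lemma pvWalk_neg (V : PySem.Set Int) (T c : Int) (hc : c < 0) (hcT : c ≤ T) (hne : c ≠ T) :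
    ∀ (fuel : Nat) (run : Int), run ≤ c →
      (V.filter (fun v => decide (v ≤ run))).length < fuel →
      pvWalkA V T c fuel run = false := by
  intro fuel
  induction fuel with
  | zero => intro run _ h; omega
  | succ fuel ih =>
    intro run hrc hmeas
    rw [pvWalkA]
    by_cases h1 : run ≤ T
    · rw [if_pos h1]
      cases hcon : PySem.Set.contains V run with
      | false => simp [hcon]
      | true =>
        have hmem : run ∈ V := by simpa using hcon
        have hrT : run ≠ T := by
          rcases eq_or_lt_of_le hrc with h' | h' <;> omega
        simp only [hcon, Bool.not_true, Bool.false_eq_true, if_false, if_neg hrT]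
        apply ih _ (by omega)
        have hdec : (V.filter (fun v => decide (v ≤ run + c))).length
            < (V.filter (fun v => decide (v ≤ run))).length := by
          apply pvFilter_lt _ _ _ run hmem
          · intro v hv; simp only [decide_eq_true_eq] at hv ⊢; omega
          · simp only [decide_eq_false_iff_not]; omega
          · simp
        omega
    · rw [if_neg h1]

lemma pvWalk_pos_ndvd (V : PySem.Set Int) (T c : Int) (hc : 0 < c) (hnd : ¬ c ∣ T) :
    ∀ (fuel : Nat) (run : Int), c ∣ run →
      (V.filter (fun v => decide (run ≤ v))).length < fuel →
      pvWalkA V T c fuel run = false := by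
  intro fuel
  induction fuel with
  | zero => intro run _ h; omega
  | succ fuel ih =>
    intro run hdvd hmeas
    rw [pvWalkA]
    by_cases h1 : run ≤ T
    · rw [if_pos h1]
      cases hcon : PySem.Set.contains V run with
      | false => simp [hcon]
      | true =>
        have hmem : run ∈ V := by simpa using hcon
        have hrT : run ≠ T := fun h => hnd (h ▸ hdvd)
        simp only [hcon, Bool.not_true, Bool.false_eq_true, if_false, if_neg hrT]
        apply ih _ (dvd_add hdvd (dvd_refl c))
        have hdec : (V.filter (fun v => decide (run + c ≤ v))).length
            < (V.filter (fun v => decide (run ≤ v))).length := by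
          apply pvFilter_lt _ _ _ run hmem
          · intro v hv; simp only [decide_eq_true_eq] at hv ⊢; omega
          · simp only [decide_eq_false_iff_not]; omega
          · simp
        omega
    · rw [if_neg h1]

lemma pvWalk_pos_dvd (V : PySem.Set Int) (T c K : Int) (hc : 0 < c) (hT : T = K * c) :
    ∀ (fuel : Nat) (j : Int), 1 ≤ j → j ≤ K →
      (V.filter (fun v => decide (j * c ≤ v))).length < fuel →
      pvWalkA V T c fuel (j * c)
        = (PySem.List.pyRange j (K + 1) 1).all (fun i => PySem.Set.contains V (i * c)) := by
  intro fuel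
  induction fuel with
  | zero => intro j _ _ h; omega
  | succ fuel ih =>
    intro j hj1 hjK hmeas
    have hrun_le : j * c ≤ T := by
      rw [hT]; exact mul_le_mul_of_nonneg_right hjK (le_of_lt hc)
    rw [pvWalkA, if_pos hrun_le]
    rw [PySem.List.pyRange_one_cons (by omega : j < K + 1)]
    cases hcon : PySem.Set.contains V (j * c) with
    | false => simp only [hcon, Bool.not_false, Bool.false_eq_true, if_true, List.all_cons, Bool.false_and]
    | true =>
      have hmem : j * c ∈ V := by simpa using hcon
      simp only [hcon, Bool.not_true, Bool.false_eq_true, if_false, List.all_cons,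
        Bool.true_and]
      by_cases hjT : j * c = T
      · have hjK' : j = K := by
          have : j * c = K * c := by omega
          exact mul_right_cancel₀ (by omega) this
        rw [if_pos hjT]
        subst hjK'
        rw [PySem.List.pyRange_one_eq_nil (by omega)]
        simp
      · rw [if_neg hjT]
        have hjK'' : j < K := by
          rcases lt_or_eq_of_le hjK with h | h
          · exact h
          · subst h; omega
        have hnext : j * c + c = (j + 1) * c := by ring
        rw [hnext]
        rw [ih (j + 1) (by omega) (by omega) ?_]
        · have hdec : (V.filter (fun v => decide ((j+1) * c ≤ v))).length
              < (V.filter (fun v => decide (j * c ≤ v))).length := by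
            apply pvFilter_lt _ _ _ (j * c) hmem
            · intro v hv; simp only [decide_eq_true_eq] at hv ⊢; nlinarith
            · simp only [decide_eq_false_iff_not]; nlinarith
            · simp
          omega

lemma pvK_le (V : PySem.Set Int) (c K : Int) (hc : 0 < c) (hK : 1 ≤ K)
    (h : ∀ i : Int, 1 ≤ i → i ≤ K → i * c ∈ V) : K ≤ (V.length : Int) := by
  have hnd : ((PySem.List.pyRange 1 (K+1) 1).map (fun i => i * c)).Nodup := by
    apply List.Nodup.map
    · intro a b hab
      exact mul_right_cancel₀ (by omega) hab
    · exact PySem.List.nodup_pyRange_one 1 (K+1)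
  have hsub : ((PySem.List.pyRange 1 (K+1) 1).map (fun i => i * c)) ⊆ V := by
    intro x hx
    rcases List.mem_map.mp hx with ⟨i, hi, rfl⟩
    rcases (PySem.List.mem_pyRange_one).mp hi with ⟨h1, h2⟩
    exact h i h1 (by omega)
  have hlen : ((PySem.List.pyRange 1 (K+1) 1).map (fun i => i * c)).length ≤ V.length := by
    have h1 := List.toFinset_card_of_nodup hnd
    have h2 : ((PySem.List.pyRange 1 (K+1) 1).map (fun i => i * c)).toFinset ⊆ V.toFinset := by
      intro x hx; simp only [List.mem_toFinset] at hx ⊢; exact hsub hx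
    have h3 := Finset.card_le_card h2
    have h4 := V.toFinset_card_le
    omega
  have : ((PySem.List.pyRange 1 (K+1) 1).map (fun i => i * c)).length = (K+1-1).toNat := by
    simp [PySem.List.length_pyRange_one]
  omega

lemma pyGet?_neg_one (xs : List Int) (h : xs ≠ []) :
    PySem.List.pyGet? xs (-1) = xs.getLast? := by
  have hl : 0 < xs.length := List.length_pos_iff.mpr h
  simp only [PySem.List.pyGet?, PySem.List.pyIdx?]
  rw [if_neg (by omega), if_pos (by omega)]
  rw [Option.bind_some]
  rw [List.getLast?_eq_getElem?]
  norm_num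

lemma pvPrefixSums_ne (friends : List Int) (hne : friends ≠ []) :
    pvPrefixSums 0 friends ≠ [] := by
  intro h
  have := pvPrefixSums_length 0 friends
  rw [h] at this
  exact hne (List.eq_nil_of_length_eq_zero this.symm ▸ rfl)

lemma pvA_filter (friends : List Int) (hne : friends ≠ []) :
    best_bus_sizes friends
      = (pvPrefixSums 0 friends).filter
          (fun c => pvWalkA (PySem.Set.ofList (pvPrefixSums 0 friends))
            (0 + friends.sum) c (friends.length + 2) c) := by
  have hcum := pvFillA_eq friends [] 0 (by simp) (fun _ => hne)
  simp only [List.nil_append, List.length_nil, Nat.cast_zero] at hcum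
  have hP := pvPrefixSums_ne friends hne
  have h0 : best_bus_sizes friends =
      (match PySem.List.pyGet? (pvPrefixSums 0 friends) (-1) with
       | none => []
       | some total_people =>
         (pvPrefixSums 0 friends).foldl
           (fun acc candidate =>
             if pvWalkA (PySem.Set.ofList (pvPrefixSums 0 friends)) total_people candidate
                  (friends.length + 2) candidate
             then acc ++ [candidate] else acc) []) := by
    unfold best_bus_sizes
    rw [← hcum]
  rw [h0, pyGet?_neg_one _ hP, pvPrefixSums_getLast? _ _ hne]
  simp only
  rw [PySem.List.foldl_append_if_eq_filter]
  simp

lemma pvB_filter (friends : List Int) (hne : friends ≠ []) :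
    best_bus_sizes_alt friends
      = (pvPrefixSums 0 friends).filter
          (fun c => PySem.Set.contains
            ((PySem.List.pyRange 1 ((friends.length : Int) + 1) 1).foldl
              (fun g k =>
                if PySem.Int.mod (0 + friends.sum) k = 0 then
                  if (PySem.List.pyRange 1 (k + 1) 1).all
                       (fun j => PySem.Set.contains (PySem.Set.ofList (pvPrefixSums 0 friends))
                         (j * PySem.Int.floordiv (0 + friends.sum) k))
                  then PySem.Set.add g (PySem.Int.floordiv (0 + friends.sum) k) else g
                else g) PySem.Set.empty) c) := by
  have hP := pvPrefixSums_ne friends hne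
  unfold best_bus_sizes_alt
  rw [pvFoldB_eq]
  simp only [List.nil_append]
  rw [pyGet?_neg_one _ hP, pvPrefixSums_getLast? _ _ hne]
  rfl

lemma pvMem_goodFoldP (p : Int → Prop) [DecidablePred p] (q : Int → Bool) (f : Int → Int) :
    ∀ (l : List Int) (g : PySem.Set Int) (y : Int),
      (y ∈ l.foldl (fun g k => if p k then (if q k then PySem.Set.add g (f k) else g) else g) g
        ↔ y ∈ g ∨ ∃ k ∈ l, p k ∧ q k = true ∧ y = f k) := by
  intro l
  induction l with
  | nil => simp
  | cons x xs ih =>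
    intro g y
    simp only [List.foldl_cons, ih]
    by_cases hp : p x <;> by_cases hq : q x <;>
      simp [hp, hq, PySem.Set.mem_add, or_assoc]

lemma pvMem_good (friends : List Int) (y : Int) :
    (y ∈ (PySem.List.pyRange 1 ((friends.length : Int) + 1) 1).foldl
        (fun g k =>
          if PySem.Int.mod (0 + friends.sum) k = 0 then
            if (PySem.List.pyRange 1 (k + 1) 1).all
                 (fun j => PySem.Set.contains (PySem.Set.ofList (pvPrefixSums 0 friends))
                   (j * PySem.Int.floordiv (0 + friends.sum) k))
            then PySem.Set.add g (PySem.Int.floordiv (0 + friends.sum) k) else g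
          else g) PySem.Set.empty
      ↔ ∃ k, (1 ≤ k ∧ k < (friends.length : Int) + 1) ∧
          PySem.Int.mod (0 + friends.sum) k = 0 ∧
          ((PySem.List.pyRange 1 (k + 1) 1).all
            (fun j => PySem.Set.contains (PySem.Set.ofList (pvPrefixSums 0 friends))
              (j * PySem.Int.floordiv (0 + friends.sum) k)) = true) ∧
          y = PySem.Int.floordiv (0 + friends.sum) k) := by
  rw [pvMem_goodFoldP]
  simp only [PySem.Set.empty]
  constructor
  · rintro (h | ⟨k, hk, hmod, hall, hy⟩)
    · simp at h
    · exact ⟨k, PySem.List.mem_pyRange_one.mp hk, hmod, hall, hy⟩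
  · rintro ⟨k, hk, hmod, hall, hy⟩
    exact Or.inr ⟨k, PySem.List.mem_pyRange_one.mpr hk, hmod, hall, hy⟩

lemma pvWalkA_iff_good (V : PySem.Set Int) (T c : Int) (n : Nat)
    (hT : 0 < T) (hc0 : c ≠ 0) (hVn : V.length ≤ n) :
    (pvWalkA V T c (n+2) c = true ↔
      ∃ k : Int, (1 ≤ k ∧ k < (n:Int)+1) ∧ PySem.Int.mod T k = 0 ∧
        ((PySem.List.pyRange 1 (k+1) 1).all
          (fun j => PySem.Set.contains V (j * PySem.Int.floordiv T k)) = true) ∧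
        c = PySem.Int.floordiv T k) := by
  have hmeas : ∀ (p : Int → Bool), (V.filter p).length < n + 2 := fun p =>
    lt_of_le_of_lt (le_trans (List.length_filter_le _ _) hVn) (by omega)
  constructor
  · intro hw
    rcases lt_trichotomy c 0 with hc | hc | hc
    · exfalso
      have := pvWalk_neg V T c hc (by omega) (by omega) (n+2) c le_rfl (hmeas _)
      rw [this] at hw; exact Bool.false_ne_true hw
    · exact absurd hc hc0
    · by_cases hdvd : c ∣ T
      · have hKc : (T / c) * c = T := Int.ediv_mul_cancel hdvd
        have hcT : c ≤ T := Int.le_of_dvd hT hdvd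
        have hK1 : 1 ≤ T / c := (Int.le_ediv_iff_mul_le hc).mpr (by omega)
        have hwalkeq := pvWalk_pos_dvd V T c (T / c) hc hKc.symm (n+2) 1 le_rfl hK1 ?_
        · rw [one_mul] at hwalkeq
          have hall : (PySem.List.pyRange 1 (T / c + 1) 1).all
              (fun i => PySem.Set.contains V (i * c)) = true := by rw [← hwalkeq]; exact hw
          have hallmem : ∀ i : Int, 1 ≤ i → i ≤ T / c → i * c ∈ V := by
            intro i h1 h2
            have := List.all_eq_true.mp hall i
              (PySem.List.mem_pyRange_one.mpr ⟨h1, by omega⟩)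
            simpa using this
          have hKn := pvK_le V c (T / c) hc hK1 hallmem
          have hfd : PySem.Int.floordiv T (T / c) = c := by
            rw [PySem.Int.floordiv_eq_ediv_of_pos (by omega)]
            calc T / (T / c) = ((T / c) * c) / (T / c) := by rw [hKc]
              _ = c := Int.mul_ediv_cancel_left c (by omega)
          refine ⟨T / c, ⟨hK1, by omega⟩, ?_, ?_, hfd.symm⟩
          · exact (PySem.Int.mod_eq_zero_iff_dvd T (T / c)).mpr ⟨c, hKc.symm⟩
          · rw [hfd]; exact hall
        · exact hmeas _
      · exfalso
        have := pvWalk_pos_ndvd V T c hc hdvd (n+2) c (dvd_refl c) (hmeas _)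
        rw [this] at hw; exact Bool.false_ne_true hw
  · rintro ⟨k, ⟨hk1, hkn⟩, hmod, hall, hceq⟩
    have hkdvd : k ∣ T := (PySem.Int.mod_eq_zero_iff_dvd T k).mp hmod
    have hfd : PySem.Int.floordiv T k = T / k :=
      PySem.Int.floordiv_eq_ediv_of_pos (by omega)
    have hc_eq : c = T / k := by rw [hceq, hfd]
    have hkT : k ≤ T := Int.le_of_dvd hT hkdvd
    have hc1 : 1 ≤ c := by
      rw [hc_eq]; exact (Int.le_ediv_iff_mul_le (by omega)).mpr (by omega)
    have hTkc : T = k * c := by rw [hc_eq]; exact (Int.mul_ediv_cancel' hkdvd).symm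
    have hwalkeq := pvWalk_pos_dvd V T c k (by omega) (by linarith [hTkc]) (n+2) 1 le_rfl hk1 (hmeas _)
    rw [one_mul] at hwalkeq
    rw [hwalkeq]
    rw [hfd, ← hc_eq] at hall
    exact hall

-- for total ≤ 0 without the D_ condition, good = {total}
lemma pvGood_char (friends : List Int) (hne : friends ≠ []) (hT : friends.sum ≤ 0)
    (hnD : ¬ D_best_bus_sizes friends) (y : Int) :
    (y ∈ (PySem.List.pyRange 1 ((friends.length : Int) + 1) 1).foldl
        (fun g k =>
          if PySem.Int.mod (0 + friends.sum) k = 0 then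
            if (PySem.List.pyRange 1 (k + 1) 1).all
                 (fun j => PySem.Set.contains (PySem.Set.ofList (pvPrefixSums 0 friends))
                   (j * PySem.Int.floordiv (0 + friends.sum) k))
            then PySem.Set.add g (PySem.Int.floordiv (0 + friends.sum) k) else g
          else g) PySem.Set.empty
      ↔ y = friends.sum) := by
  have hn1 : 1 ≤ friends.length := List.length_pos_iff.mpr hne
  have hTP : friends.sum ∈ pvPrefixSums 0 friends := by
    have h := pvPrefixSums_getLast? 0 friends hne
    rw [zero_add] at h
    rcases List.getLast?_eq_some_iff.mp h with ⟨l', hl'⟩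
    rw [hl']; simp
  rw [pvMem_good]
  constructor
  · rintro ⟨k, ⟨hk1, hkn⟩, hmod, hall, rfl⟩
    rcases eq_or_lt_of_le hT with hT0 | hTneg
    · -- total = 0 : floordiv 0 k = 0
      rw [zero_add, hT0]
      rw [PySem.Int.floordiv_eq_ediv_of_pos (by omega)]
      simp
    · -- total < 0 : k = 1 or D_ holds
      rcases eq_or_lt_of_le hk1 with hk1' | hk2
    -- k = 1
      · rw [← hk1', zero_add]
        rw [PySem.Int.floordiv_eq_ediv_of_pos (by omega)]
        simp
      · exfalso
        apply hnD
        refine ⟨hTneg, k, PySem.List.mem_pyRange_one.mpr ⟨by omega, hkn⟩, ?_, ?_⟩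
        · rw [zero_add] at hmod; exact hmod
        · intro j hj
          have := List.all_eq_true.mp hall j hj
          rw [zero_add] at this
          rw [← PySem.Set.mem_ofList]
          simpa using this
  · rintro rfl
    refine ⟨1, ⟨le_rfl, by omega⟩, ?_, ?_, ?_⟩
    · rw [PySem.Int.mod_eq_zero_iff_dvd]; exact one_dvd _
    · have hfd1 : PySem.Int.floordiv (0 + friends.sum) 1 = friends.sum := by
        rw [PySem.Int.floordiv_eq_ediv_of_pos (by omega)]; simp
      rw [hfd1]
      rw [show (1:Int) + 1 = 2 from rfl]
      rw [PySem.List.pyRange_one_cons (by omega), PySem.List.pyRange_one_eq_nil (by omega)]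
      simp only [List.all_cons, List.all_nil, Bool.and_true, one_mul]
      have : friends.sum ∈ PySem.Set.ofList (pvPrefixSums 0 friends) :=
        (PySem.Set.mem_ofList _ _).mpr hTP
      simpa using this
    · rw [PySem.Int.floordiv_eq_ediv_of_pos (by omega)]; simp

-- A's walk succeeds for total ≤ 0 exactly at the total itself
lemma pvWalkA_nonpos (friends : List Int) (hne : friends ≠ []) (hT : friends.sum ≤ 0)
    (c : Int) :
    pvWalkA (PySem.Set.ofList (pvPrefixSums 0 friends)) (0 + friends.sum) c
        (friends.length + 2) c = (c == friends.sum) := by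
  have hTP : friends.sum ∈ pvPrefixSums 0 friends := by
    have h := pvPrefixSums_getLast? 0 friends hne
    rw [zero_add] at h
    rcases List.getLast?_eq_some_iff.mp h with ⟨l', hl'⟩
    rw [hl']; simp
  have hTV : friends.sum ∈ PySem.Set.ofList (pvPrefixSums 0 friends) :=
    (PySem.Set.mem_ofList _ _).mpr hTP
  have hVn : (PySem.Set.ofList (pvPrefixSums 0 friends)).length ≤ friends.length := by
    have h1 := PySem.Set.length_ofList_le (pvPrefixSums 0 friends)
    have h2 := pvPrefixSums_length 0 friends
    omega
  have hmeas : ∀ (p : Int → Bool),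
      ((PySem.Set.ofList (pvPrefixSums 0 friends)).filter p).length < friends.length + 2 :=
    fun p => lt_of_le_of_lt (le_trans (List.length_filter_le _ _) hVn) (by omega)
  by_cases hceq : c = friends.sum
  · subst hceq
    rw [show friends.length + 2 = (friends.length + 1) + 1 from rfl, pvWalkA]
    rw [if_pos (by omega)]
    have hco : PySem.Set.contains (PySem.Set.ofList (pvPrefixSums 0 friends)) friends.sum
        = true := by simpa using hTV
    rw [hco]
    simp
  · have hbe : (c == friends.sum) = false := by simp [hceq]
    rw [hbe]
    by_cases hle : c ≤ friends.sum
    · exact pvWalk_neg _ _ c (by omega) (by omega) (by omega) _ c le_rfl (hmeas _)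
    · rw [show friends.length + 2 = (friends.length + 1) + 1 from rfl, pvWalkA]
      rw [if_neg (by omega)]

lemma pvMain (friends : List Int) (hne : friends ≠ [])
    (hnz : ¬((0:Int) ∈ pvPrefixSums 0 friends ∧ 0 < friends.sum))
    (hnD : ¬ D_best_bus_sizes friends) :
    best_bus_sizes friends = best_bus_sizes_alt friends := by
  rw [pvA_filter friends hne, pvB_filter friends hne]
  have hTP : friends.sum ∈ pvPrefixSums 0 friends := by
    have h := pvPrefixSums_getLast? 0 friends hne
    rw [zero_add] at h
    rcases List.getLast?_eq_some_iff.mp h with ⟨l', hl'⟩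
    rw [hl']; simp
  have hTV : friends.sum ∈ PySem.Set.ofList (pvPrefixSums 0 friends) :=
    (PySem.Set.mem_ofList _ _).mpr hTP
  have hVn : (PySem.Set.ofList (pvPrefixSums 0 friends)).length ≤ friends.length := by
    have h1 := PySem.Set.length_ofList_le (pvPrefixSums 0 friends)
    have h2 := pvPrefixSums_length 0 friends
    omega
  apply List.filter_congr
  intro c hc
  set G : PySem.Set Int := (PySem.List.pyRange 1 ((friends.length : Int) + 1) 1).foldl
      (fun g k =>
        if PySem.Int.mod (0 + friends.sum) k = 0 then
          if (PySem.List.pyRange 1 (k + 1) 1).all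
               (fun j => PySem.Set.contains (PySem.Set.ofList (pvPrefixSums 0 friends))
                 (j * PySem.Int.floordiv (0 + friends.sum) k))
          then PySem.Set.add g (PySem.Int.floordiv (0 + friends.sum) k) else g
        else g) PySem.Set.empty with hGdef
  by_cases hT : friends.sum ≤ 0
  · -- total ≤ 0: both sides equal (c == total)
    rw [pvWalkA_nonpos friends hne hT c]
    cases hGc : PySem.Set.contains G c with
    | true =>
      have hmem : c ∈ G := by simpa using hGc
      have hceq : c = friends.sum := (pvGood_char friends hne hT hnD c).mp (by
        rw [hGdef] at hmem; exact hmem)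
      simp [hceq]
    | false =>
      have hnmem : ¬ c ∈ G := by simpa using hGc
      have hcne : c ≠ friends.sum := fun h => hnmem (by
        rw [hGdef]; exact (pvGood_char friends hne hT hnD c).mpr h)
      simp [hcne]
  · push_neg at hT
    have hc0 : c ≠ 0 := fun h => hnz ⟨h ▸ hc, hT⟩
    have hiff := pvWalkA_iff_good (PySem.Set.ofList (pvPrefixSums 0 friends)) (friends.sum) c
      friends.length hT hc0 hVn
    cases hGc : PySem.Set.contains G c with
    | true =>
      have hmem : c ∈ G := by simpa using hGc
      rw [hGdef] at hmem
      rcases (pvMem_good friends c).mp hmem with ⟨k, hk, hmod, hall, hceq⟩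
      rw [zero_add] at hmod hall hceq ⊢
      exact hiff.mpr ⟨k, hk, hmod, hall, hceq⟩
    | false =>
      by_contra hw
      simp only [Bool.not_eq_false] at hw
      rw [zero_add] at hw
      rcases hiff.mp hw with ⟨k, hk, hmod, hall, hceq⟩
      have hmem : c ∈ G := by
        rw [hGdef]
        exact (pvMem_good friends c).mpr
          ⟨k, hk, by rw [zero_add]; exact hmod, by rw [zero_add]; exact hall,
            by rw [zero_add]; exact hceq⟩
      have hctr : PySem.Set.contains G c = true := by simpa using hmem
      rw [hGc] at hctr
      exact Bool.false_ne_true hctr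

-- inside D_: B's output contains total/k ≠ total while all of A's elements equal the total
lemma pvTight (friends : List Int) (hne : friends ≠ [])
    (hD : D_best_bus_sizes friends) :
    best_bus_sizes friends ≠ best_bus_sizes_alt friends := by
  rcases hD with ⟨hTneg, k, hk, hmod, hchain⟩
  rcases PySem.List.mem_pyRange_one.mp hk with ⟨hk2, hkn⟩
  have hkdvd : k ∣ friends.sum := (PySem.Int.mod_eq_zero_iff_dvd friends.sum k).mp hmod
  have hfd : PySem.Int.floordiv friends.sum k = friends.sum / k :=
    PySem.Int.floordiv_eq_ediv_of_pos (by omega)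
  have hTk : friends.sum = k * PySem.Int.floordiv friends.sum k := by
    rw [hfd]; exact (Int.mul_ediv_cancel' hkdvd).symm
  have hszneg : PySem.Int.floordiv friends.sum k < 0 := by nlinarith [hTk]
  have hszT : PySem.Int.floordiv friends.sum k ≠ friends.sum := by
    intro h; nlinarith [hTk]
  have hszP : PySem.Int.floordiv friends.sum k ∈ pvPrefixSums 0 friends := by
    have := hchain 1 (PySem.List.mem_pyRange_one.mpr ⟨le_rfl, by omega⟩)
    simpa using this
  have hszB : PySem.Int.floordiv friends.sum k ∈ best_bus_sizes_alt friends := by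
    rw [pvB_filter friends hne]
    rw [List.mem_filter]
    refine ⟨hszP, ?_⟩
    have hmem : PySem.Int.floordiv friends.sum k ∈ _ := (pvMem_good friends _).mpr
      ⟨k, ⟨by omega, hkn⟩, by rw [zero_add]; exact hmod, ?_, by rw [zero_add]⟩
    · simpa using hmem
    · rw [zero_add]
      rw [List.all_eq_true]
      intro j hj
      have hm : j * PySem.Int.floordiv friends.sum k
          ∈ PySem.Set.ofList (pvPrefixSums 0 friends) :=
        (PySem.Set.mem_ofList _ _).mpr (hchain j hj)
      simpa using hm
  intro hAB
  have hszA : PySem.Int.floordiv friends.sum k ∈ best_bus_sizes friends := by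
    rw [hAB]; exact hszB
  rw [pvA_filter friends hne] at hszA
  rcases List.mem_filter.mp hszA with ⟨_, hwalk⟩
  rw [pvWalkA_nonpos friends hne (by omega) (PySem.Int.floordiv friends.sum k)] at hwalk
  exact hszT (by simpa using hwalk)

-- ===== VERDICT (by name: the statement is the Claim_ definition above) =====
theorem best_bus_sizes_spec : Claim_unchanged_best_bus_sizes := by
  intro friends _ hpre
  unfold Spec_best_bus_sizes
  intro hnD
  exact pvMain friends hpre.1 hpre.2 hnD

theorem best_bus_sizes_changed : Claim_changed_best_bus_sizes := by
  unfold Claim_changed_best_bus_sizes; decide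

theorem best_bus_sizes_tight : Claim_exact_best_bus_sizes := by
  intro friends _ hpre hD
  exact pvTight friends hpre.1 hD
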